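-- pv_equiv track=rewrite | github.com/joe-cooney02/quantum_tsp_solver | quantum_helpers.py | tour_to_bitstring
-- ===== SOURCE A (Python) =====
-- def tour_to_bitstring(tour, qubit_to_edge_map):
--     """
--     Convert a tour (list of nodes) to a bitstring using the qubit-to-edge mapping.
--
--     Parameters:
--     -----------
--     tour : list
--         Ordered list of nodes representing the tour (including return to start)
--         e.g., [0, 1, 2, 3, 0]
--     qubit_to_edge_map : dict
--         Mapping from qubit index to edge tuple
--         e.g., {0: (0, 1), 1: (0, 2), ...}
--
--     Returns:
--     --------
--     str: Bitstring where '1' indicates edge is in tour, '0' indicates not in tour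
--     """
--     # Create reverse mapping: edge -> qubit
--     edge_to_qubit = {edge: qubit for qubit, edge in qubit_to_edge_map.items()}
--
--     num_qubits = len(qubit_to_edge_map)
--     bitstring = ['0'] * num_qubits
--
--     # Set bits for edges in the tour
--     for i in range(len(tour) - 1):
--         edge = (tour[i], tour[i + 1])
--         if edge in edge_to_qubit:
--             qubit_idx = edge_to_qubit[edge]
--             bitstring[qubit_idx] = '1'
--
--     return ''.join(bitstring)
-- ===== SOURCE B (Python) =====
-- def tour_to_bitstring(tour, qubit_to_edge_map):
--     """Scan qubits against a set of the tour's directed edges (no reverse map)."""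
--     tour_edges = set(zip(tour, tour[1:]))
--     bits = ['0'] * len(qubit_to_edge_map)
--     for qubit, edge in qubit_to_edge_map.items():
--         if edge in tour_edges:
--             bits[qubit] = '1'
--     return ''.join(bits)
-- ===== Notes on version B (the rewrite author's own statement) =====
-- stated objective: simpler
-- what changed: B drops A's reverse edge->qubit dict and flips the traversal: it builds a set of the tour's directed edges once and scans the qubit-to-edge map, setting a bit by membership test, instead of scanning the tour and looking edges up in a reverse map.
-- outside the precondition, e.g. on tour_to_bitstring([0, 1], {0: (0, 1), 1: (0, 1)}): A returns '01', B returns '11'; on tour_to_bitstring([0, 1], {5: (0, 1), 0: (0, 1)}): A returns '10', B raises IndexError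
import Mathlib
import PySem

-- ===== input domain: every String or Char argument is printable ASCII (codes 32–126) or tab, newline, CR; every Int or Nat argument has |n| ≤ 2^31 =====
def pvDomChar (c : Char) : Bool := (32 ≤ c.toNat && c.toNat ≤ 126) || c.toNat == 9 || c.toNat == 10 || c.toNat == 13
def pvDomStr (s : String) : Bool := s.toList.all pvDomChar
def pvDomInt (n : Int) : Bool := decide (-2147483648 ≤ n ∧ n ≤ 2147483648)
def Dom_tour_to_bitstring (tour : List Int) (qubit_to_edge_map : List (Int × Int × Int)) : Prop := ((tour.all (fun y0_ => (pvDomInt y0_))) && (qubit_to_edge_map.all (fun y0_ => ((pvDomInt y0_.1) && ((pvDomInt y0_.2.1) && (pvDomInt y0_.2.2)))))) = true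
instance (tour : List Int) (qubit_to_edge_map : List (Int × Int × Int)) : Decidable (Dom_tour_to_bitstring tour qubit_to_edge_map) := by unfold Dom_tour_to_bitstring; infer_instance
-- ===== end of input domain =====

-- B replaces A's reverse edge->qubit dict with a set of the tour's directed edges and scans the
-- qubit map instead of the tour (objective: simpler); return values agree on Pre_.


-- ===== PORT A =====
def tour_to_bitstring (tour : List Int) (qubit_to_edge_map : List (Int × Int × Int)) : String :=
  let d := PySem.Dict.ofList qubit_to_edge_map
  -- edge_to_qubit = {edge: qubit for qubit, edge in qubit_to_edge_map.items()}
  let edge_to_qubit : PySem.Dict (Int × Int) Int :=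
    d.items.foldl (fun acc p => acc.insert p.2 p.1) PySem.Dict.empty
  let num_qubits := d.items.length
  let bitstring : List Char := List.replicate num_qubits '0'
  -- for i in range(len(tour) - 1): …
  let bitstring :=
    (PySem.List.pyRange 0 (PySem.List.len tour - 1) 1).foldl
      (fun b i =>
        let edge := (PySem.List.pyGetD tour i 0, PySem.List.pyGetD tour (i + 1) 0)
        match edge_to_qubit.get? edge with
        | some qubit_idx => PySem.List.pySetD b qubit_idx '1'
        | none => b) bitstring
  String.ofList bitstring

-- ===== PORT B =====
def tour_to_bitstring_alt (tour : List Int) (qubit_to_edge_map : List (Int × Int × Int)) : String :=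
  -- tour_edges = set(zip(tour, tour[1:]))
  let tour_edges : PySem.Set (Int × Int) :=
    PySem.Set.ofList (List.zip tour (PySem.List.slice tour (some 1) none))
  let d := PySem.Dict.ofList qubit_to_edge_map
  let bits0 : List Char := List.replicate d.items.length '0'
  -- for qubit, edge in qubit_to_edge_map.items(): if edge in tour_edges: bits[qubit] = '1'
  let bits := d.items.foldl
    (fun b p => if tour_edges.contains p.2 then PySem.List.pySetD b p.1 '1' else b) bits0
  String.ofList bits

-- ===== PRECONDITION & SPEC =====
-- Pre_ excludes inputs where A raises IndexError (a tour edge whose qubit index lies outside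
-- [-n, n)) and malformed maps in which two qubits carry the same tour edge — a last-vs-all
-- duplicate-value corner no caller specifies, where A's last-match bit and B's all-matches
-- bits are both defensible.
def Pre_tour_to_bitstring (tour : List Int) (qubit_to_edge_map : List (Int × Int × Int)) : Prop :=
  ∀ p ∈ (PySem.Dict.ofList qubit_to_edge_map).items, p.2 ∈ tour.zip tour.tail →
    ((PySem.Dict.ofList qubit_to_edge_map).items.map Prod.snd).count p.2 ≤ 1 ∧
    PySem.Raise.InRange (PySem.Dict.ofList qubit_to_edge_map).items.length p.1
instance (tour : List Int) (qubit_to_edge_map : List (Int × Int × Int)) : Decidable (Pre_tour_to_bitstring tour qubit_to_edge_map) := by unfold Pre_tour_to_bitstring; infer_instance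

def pvWitness_tour_to_bitstring : List Int × (List (Int × Int × Int)) :=
  ([0, 1, 2, 0], [(0, (0, 1)), (1, (1, 2)), (2, (2, 0)), (3, (0, 2))])

def Spec_tour_to_bitstring (tour : List Int) (qubit_to_edge_map : List (Int × Int × Int)) (out : String) : Prop := out = tour_to_bitstring_alt tour qubit_to_edge_map
instance (tour : List Int) (qubit_to_edge_map : List (Int × Int × Int)) (out : String) : Decidable (Spec_tour_to_bitstring tour qubit_to_edge_map out) := by unfold Spec_tour_to_bitstring; infer_instance

-- ===== CLAIM (what is proved, stated in full; the proofs are below) =====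
def Claim_equal_tour_to_bitstring : Prop := ∀ (tour : List Int) (qubit_to_edge_map : List (Int × Int × Int)), Dom_tour_to_bitstring tour qubit_to_edge_map → Pre_tour_to_bitstring tour qubit_to_edge_map → Spec_tour_to_bitstring tour qubit_to_edge_map (tour_to_bitstring tour qubit_to_edge_map)

-- ===== LEMMAS AND PROOFS =====

def wIdx (n : Nat) (i : Int) : Nat := (if i < 0 then i + n else i).toNat

theorem pySetD_inrange (xs : List Char) (i : Int) (v : Char) (h : PySem.Raise.InRange xs.length i) :
    PySem.List.pySetD xs i v = xs.set (wIdx xs.length i) v := by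
  unfold wIdx
  unfold PySem.List.pySetD PySem.List.pySet? PySem.List.pyIdx?
  unfold PySem.Raise.InRange at h
  split_ifs <;> simp_all <;> congr 1 <;> omega

theorem loop_shape {β : Type} (L : List β) (f : β → Option Int) (n : Nat) (b : List Char)
    (hb : b.length = n)
    (hr : ∀ x ∈ L, ∀ q, f x = some q → PySem.Raise.InRange n q) :
    L.foldl (fun b x => match f x with
      | some q => PySem.List.pySetD b q '1'
      | none => b) b
    = L.foldl (fun b x => match (f x).map (fun q => wIdx n q) with
      | some k => b.set k '1'
      | none => b) b := by
  induction L generalizing b with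
  | nil => rfl
  | cons x L ih =>
    rw [List.foldl_cons, List.foldl_cons]
    cases hfx : f x with
    | none => simp only [Option.map_none]; exact ih b hb (fun y hy => hr y (List.mem_cons_of_mem _ hy))
    | some q =>
      simp only [Option.map_some]
      have hin : PySem.Raise.InRange b.length q := by
        rw [hb]; exact hr x (List.mem_cons_self) q hfx
      rw [pySetD_inrange b q '1' hin, hb]
      exact ih _ (by simp [List.length_set, hb]) (fun y hy => hr y (List.mem_cons_of_mem _ hy))

theorem rev_get_mem (L : List (Int × Int × Int)) (acc : PySem.Dict (Int × Int) Int)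
    (e : Int × Int) (q : Int)
    (h : (L.foldl (fun d p => d.insert p.2 p.1) acc).get? e = some q) :
    acc.get? e = some q ∨ (q, e) ∈ L := by
  induction L generalizing acc with
  | nil => exact Or.inl h
  | cons p L ih =>
    rw [List.foldl_cons] at h
    rcases ih _ h with h' | h'
    · rw [PySem.Dict.get?_insert] at h'
      by_cases he : e = p.2
      · right
        have hq : q = p.1 := by simp [he] at h'; omega
        have hpe : (q, e) = p := by rw [hq, he]
        rw [hpe]; exact List.mem_cons_self
      · left; simpa [he] using h'
    · exact Or.inr (List.mem_cons_of_mem _ h')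

theorem rev_get_of_not_mem (L : List (Int × Int × Int)) (acc : PySem.Dict (Int × Int) Int)
    (e : Int × Int) (h : ∀ p ∈ L, p.2 ≠ e) :
    (L.foldl (fun d p => d.insert p.2 p.1) acc).get? e = acc.get? e := by
  induction L generalizing acc with
  | nil => rfl
  | cons p L ih =>
    rw [List.foldl_cons, ih _ (fun y hy => h y (List.mem_cons_of_mem _ hy))]
    rw [PySem.Dict.get?_insert]
    simp [Ne.symm (h p List.mem_cons_self)]

theorem rev_get_of_mem (L : List (Int × Int × Int)) (acc : PySem.Dict (Int × Int) Int)
    (e : Int × Int) (q : Int) (hm : (q, e) ∈ L) (hc : (L.map Prod.snd).count e ≤ 1) :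
    (L.foldl (fun d p => d.insert p.2 p.1) acc).get? e = some q := by
  induction L generalizing acc with
  | nil => cases hm
  | cons p L ih =>
    rw [List.foldl_cons]
    rcases List.mem_cons.mp hm with rfl | hm'
    · have hz : ∀ y ∈ L, y.2 ≠ e := by
        intro y hy hye
        have : 2 ≤ (((q, e) :: L).map Prod.snd).count e := by
          simp only [List.map_cons, List.count_cons]
          have : 1 ≤ (L.map Prod.snd).count e := List.one_le_count_iff.mpr (by
            exact List.mem_map.mpr ⟨y, hy, hye⟩)
          simp_all
        omega
      rw [rev_get_of_not_mem L _ e hz, PySem.Dict.get?_insert]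
      simp
    · by_cases hpe : p.2 = e
      · exfalso
        have : 2 ≤ ((p :: L).map Prod.snd).count e := by
          simp only [List.map_cons, List.count_cons]
          have : 1 ≤ (L.map Prod.snd).count e := List.one_le_count_iff.mpr (by
            exact List.mem_map.mpr ⟨(q, e), hm', rfl⟩)
          simp_all
        omega
      · exact ih _ hm' (by simp only [List.map_cons, List.count_cons] at hc; omega) -- count ≤ 1 for L
theorem foldl_write_getElem? {β : Type} (L : List β) (f : β → Option Nat) (b : List Char)
    (j : Nat) :
    (L.foldl (fun b x => match f x with
      | some k => b.set k '1'
      | none => b) b)[j]?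
    = if L.any (fun x => f x == some j) && j < b.length then some '1' else b[j]? := by
  induction L generalizing b with
  | nil => simp
  | cons x L ih =>
    cases hfx : f x with
    | none =>
      rw [List.foldl_cons]; simp only [hfx]
      rw [ih b]; simp [List.any_cons, hfx]
    | some k =>
      rw [List.foldl_cons]; simp only [hfx]
      rw [ih (b.set k '1')]
      simp only [List.length_set, List.any_cons, hfx, List.getElem?_set]
      by_cases hj : j < b.length
      · by_cases ha : L.any (fun y => f y == some j) = true
        · simp [ha, hj]
        · by_cases hk : k = j
          · simp [hk, hj, ha]
          · simp [hk, hj, ha]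
      · by_cases hk : k = j
        · simp [hk, hj]
        · simp [hk, hj]
theorem pyRange_pairs_eq_zip (tour : List Int) :
    (PySem.List.pyRange 0 (PySem.List.len tour - 1) 1).map
      (fun i => (PySem.List.pyGetD tour i 0, PySem.List.pyGetD tour (i + 1) 0))
      = tour.zip tour.tail := by
  rw [PySem.List.pyRange_one, PySem.List.len_eq]
  rw [List.map_map]
  apply List.ext_getElem
  · simp [List.length_zip, List.length_tail]
  · intro k h1 h2
    simp only [List.getElem_map, Function.comp, List.getElem_zip, List.getElem_range]
    have hlen : (↑tour.length - 1 - 0 : Int).toNat = tour.length - 1 := by omega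
    have hk : k < tour.length - 1 := by
      simpa [hlen] using h1
    have e1 : PySem.List.pyGetD tour ((0 : Int) + k) 0 = tour[k]'(by omega) := by
      rw [show ((0:Int) + k) = (k : Int) by omega]
      rw [PySem.List.pyGetD_eq_getElem tour 0 (by omega) (by exact_mod_cast by omega)]
      simp
    have e2 : PySem.List.pyGetD tour ((0 : Int) + k + 1) 0 = tour[k + 1]'(by omega) := by
      rw [show ((0:Int) + k + 1) = ((k + 1 : Nat) : Int) by push_cast; ring]
      rw [PySem.List.pyGetD_eq_getElem tour 0 (by omega) (by exact_mod_cast by omega)]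
      simp
    rw [e1, e2]
    congr 1
    · simp [List.getElem_tail]

theorem ports_agree (tour : List Int) (m : List (Int × Int × Int))
    (hpre : ∀ p ∈ (PySem.Dict.ofList m).items, p.2 ∈ tour.zip tour.tail →
      ((PySem.Dict.ofList m).items.map Prod.snd).count p.2 ≤ 1 ∧
      PySem.Raise.InRange (PySem.Dict.ofList m).items.length p.1) :
    (let d := PySem.Dict.ofList m
     let edge_to_qubit : PySem.Dict (Int × Int) Int :=
       d.items.foldl (fun acc p => acc.insert p.2 p.1) PySem.Dict.empty
     let num_qubits := d.items.length
     let bitstring : List Char := List.replicate num_qubits '0'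
     let bitstring :=
       (PySem.List.pyRange 0 (PySem.List.len tour - 1) 1).foldl
         (fun b i =>
           let edge := (PySem.List.pyGetD tour i 0, PySem.List.pyGetD tour (i + 1) 0)
           match edge_to_qubit.get? edge with
           | some qubit_idx => PySem.List.pySetD b qubit_idx '1'
           | none => b) bitstring
     String.ofList bitstring)
    =
    (let tour_edges : PySem.Set (Int × Int) :=
       PySem.Set.ofList (List.zip tour (PySem.List.slice tour (some 1) none))
     let d := PySem.Dict.ofList m
     let bits0 : List Char := List.replicate d.items.length '0'
     let bits := d.items.foldl
       (fun b p => if tour_edges.contains p.2 then PySem.List.pySetD b p.1 '1' else b) bits0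
     String.ofList bits) := by
  simp only []
  -- names
  set items := (PySem.Dict.ofList m).items with hitems
  set n := items.length with hn
  set rev : PySem.Dict (Int × Int) Int :=
    items.foldl (fun acc p => acc.insert p.2 p.1) PySem.Dict.empty with hrev
  set tes := tour.zip tour.tail with htes
  have hslice : PySem.List.slice tour (some 1) none = tour.tail := by
    rw [PySem.List.slice_from _ (by norm_num)]; simp
  rw [hslice]
  congr 1
  -- A loop over range -> loop over tes
  rw [show
      (PySem.List.pyRange 0 (PySem.List.len tour - 1) 1).foldl
        (fun b i =>
          match rev.get? (PySem.List.pyGetD tour i 0, PySem.List.pyGetD tour (i + 1) 0) with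
          | some qubit_idx => PySem.List.pySetD b qubit_idx '1'
          | none => b) (List.replicate n '0')
      = tes.foldl (fun b e =>
          match rev.get? e with
          | some qubit_idx => PySem.List.pySetD b qubit_idx '1'
          | none => b) (List.replicate n '0') from by
    rw [htes, ← pyRange_pairs_eq_zip tour, List.foldl_map]]
  -- rewrite A loop into plain-set form
  have hrA : ∀ e ∈ tes, ∀ q, rev.get? e = some q → PySem.Raise.InRange n q := by
    intro e he q hq
    rcases rev_get_mem items PySem.Dict.empty e q hq with h' | h'
    · simp [PySem.Dict.get?_empty] at h'
    · exact (hpre (q, e) h' (by simpa using he)).2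
  rw [loop_shape tes (fun e => rev.get? e) n (List.replicate n '0') (by simp) hrA]
  -- rewrite B loop into plain-set form
  have hstepB : (fun (b : List Char) (p : Int × Int × Int) =>
        if (PySem.Set.ofList tes).contains p.2 then PySem.List.pySetD b p.1 '1' else b)
      = (fun b p =>
        match (if (PySem.Set.ofList tes).contains p.2 then some p.1 else none) with
        | some q => PySem.List.pySetD b q '1'
        | none => b) := by
    funext b p; by_cases h : p.2 ∈ tes <;> simp [h]
  rw [hstepB]
  rw [loop_shape items (fun p => if (PySem.Set.ofList tes).contains p.2 then some p.1 else none)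
      n (List.replicate n '0') (by simp) (by
        intro p hp q hq
        by_cases h : p.2 ∈ tes
        · simp [h] at hq
          cases hq
          exact (hpre p hp h).2
        · simp [h] at hq)]
  -- elementwise
  apply List.ext_getElem?
  intro j
  rw [foldl_write_getElem?, foldl_write_getElem?]
  have hAB : tes.any (fun e => (rev.get? e).map (fun q => wIdx n q) == some j)
      = items.any (fun p =>
          ((if (PySem.Set.ofList tes).contains p.2 then some p.1 else none).map
            (fun q => wIdx n q)) == some j) := by
    rw [Bool.eq_iff_iff]
    simp only [List.any_eq_true]
    constructor
    · rintro ⟨e, he, hbeq⟩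
      cases hq : rev.get? e with
      | none => rw [hq] at hbeq; simp at hbeq
      | some q =>
        rw [hq] at hbeq
        simp only [Option.map_some, beq_iff_eq, Option.some.injEq] at hbeq
        have hmem : (q, e) ∈ items := by
          rcases rev_get_mem items PySem.Dict.empty e q hq with h' | h'
          · simp [PySem.Dict.get?_empty] at h'
          · exact h'
        refine ⟨(q, e), hmem, ?_⟩
        simp [he, hbeq]
    · rintro ⟨p, hp, hbeq⟩
      by_cases h : p.2 ∈ tes
      · simp only [PySem.Set.contains_eq_listContains, List.contains_iff_mem] at hbeq
        rw [if_pos ((PySem.Set.mem_ofList tes p.2).mpr h)] at hbeq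
        simp only [Option.map_some, beq_iff_eq, Option.some.injEq] at hbeq
        have hcount := (hpre p hp h).1
        have hget : rev.get? p.2 = some p.1 := by
          apply rev_get_of_mem items PySem.Dict.empty p.2 p.1 _ hcount
          rw [Prod.mk.eta]; exact hp
        exact ⟨p.2, h, by simp [hget, hbeq]⟩
      · simp [h] at hbeq
  rw [hAB]

-- ===== VERDICT (by name: the statement is the Claim_ definition above) =====
theorem tour_to_bitstring_spec : Claim_equal_tour_to_bitstring := by
  intro tour m _hdom hpre
  unfold Spec_tour_to_bitstring
  unfold Pre_tour_to_bitstring at hpre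
  show tour_to_bitstring tour m = tour_to_bitstring_alt tour m
  unfold tour_to_bitstring tour_to_bitstring_alt
  exact ports_agree tour m hpre
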